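-- pv_equiv track=rewrite | github.com/sjtugzx/GeoKnowledgeFusion | subimage/spaCy_v2.py | text_split_check
-- ===== SOURCE A (Python) =====
-- def text_split_check(sentences):
--     sens = []
--     for index, sentence in enumerate(sentences):
--         if index == 0:
--             sens.append(sentence)
--             continue
--         elif index == len(sentences):
--             break
--         else:
--             left_index = sens[-1].rfind('(')
--             right_index = sens[-1].rfind(')')
--             if left_index > right_index:
--                 sens[-1] += sentence
--             else:
--                 sens.append(sentence)
--     return sens
-- ===== SOURCE B (Python) =====
-- def text_split_check(sentences):
--     if not sentences:
--         return []
--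
--     def last_paren(s):
--         # True if the last parenthesis in s is '(', False if ')', None if no parens
--         for ch in reversed(s):
--             if ch == '(':
--                 return True
--             if ch == ')':
--                 return False
--         return None
--
--     done = []
--     cur = sentences[0]
--     open_ = last_paren(cur) is True
--     for s in sentences[1:]:
--         if open_:
--             cur += s
--         else:
--             done.append(cur)
--             cur = s
--         lp = last_paren(s)
--         if lp is not None:
--             open_ = lp
--     done.append(cur)
--     return done
-- ===== Notes on version B (the rewrite author's own statement) =====
-- stated objective: alternative
-- what changed: B keeps a running boolean (whether the current merged fragment's last parenthesis is an unmatched '('), updated from each new sentence alone, instead of re-running rfind over the whole accumulated tail string on every iteration.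
import Mathlib
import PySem

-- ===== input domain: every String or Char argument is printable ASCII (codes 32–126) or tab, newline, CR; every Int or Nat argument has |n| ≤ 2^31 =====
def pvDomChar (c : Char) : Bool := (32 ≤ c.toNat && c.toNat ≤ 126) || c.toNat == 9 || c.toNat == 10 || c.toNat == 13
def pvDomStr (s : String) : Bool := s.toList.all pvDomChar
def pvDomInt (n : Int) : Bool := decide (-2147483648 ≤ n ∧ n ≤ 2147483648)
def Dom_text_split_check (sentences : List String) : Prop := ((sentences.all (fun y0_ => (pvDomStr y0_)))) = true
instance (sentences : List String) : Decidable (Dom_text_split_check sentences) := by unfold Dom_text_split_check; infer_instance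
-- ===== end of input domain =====

-- B replaces A's rfind-rescan of the accumulated merged string with a running flag
-- updated from each new sentence alone (objective: alternative single-pass state).

-- ===== PORT A =====
-- s.rfind(c) for a single character c: index of the last occurrence, -1 if absent (exact).
def pvRfind (cs : List Char) (c : Char) : Int :=
  match cs.reverse.findIdx? (fun ch => ch = c) with
  | some j => ((cs.length - 1 - j : Nat) : Int)
  | none => -1

-- loop body of A: sens[-1].rfind comparison, extend last or append
def pvStepA (n : Int) (sens : List String) (p : Int × String) : List String :=
  if p.1 = 0 then sens ++ [p.2]
  else if p.1 = n then sens            -- Python's 'break'; unreachable for enumerate indices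
  else
    match sens.getLast? with
    | none => sens                     -- unreachable: sens is nonempty after index 0
    | some last =>
      if pvRfind last.toList '(' > pvRfind last.toList ')' then
        sens.dropLast ++ [last ++ p.2]
      else
        sens ++ [p.2]

def text_split_check (sentences : List String) : List String :=
  (PySem.List.enumerate sentences).foldl (pvStepA (sentences.length : Int)) []

-- ===== PORT B =====
-- last_paren: True if the last parenthesis is '(', False if ')', None if no parens
def pvLastParen (cs : List Char) : Option Bool :=
  match cs.reverse.find? (fun ch => ch == '(' || ch == ')') with
  | some ch => some (ch == '(')
  | none => none

-- loop body of B over state (done, cur, open_)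
def pvStepB (st : List String × String × Bool) (s : String) : List String × String × Bool :=
  let st' := if st.2.2 then (st.1, st.2.1 ++ s, st.2.2) else (st.1 ++ [st.2.1], s, st.2.2)
  match pvLastParen s.toList with
  | some b => (st'.1, st'.2.1, b)
  | none => st'

def text_split_check_alt (sentences : List String) : List String :=
  match sentences with
  | [] => []
  | s0 :: rest =>
    let st := rest.foldl pvStepB ([], s0, (pvLastParen s0.toList).getD false)
    st.1 ++ [st.2.1]

-- ===== PRECONDITION & SPEC =====
def Spec_text_split_check (sentences : List String) (out : List String) : Prop := out = text_split_check_alt sentences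
instance (sentences : List String) (out : List String) : Decidable (Spec_text_split_check sentences out) := by unfold Spec_text_split_check; infer_instance

-- ===== CLAIM (what is proved, stated in full; the proofs are below) =====
def Claim_equal_text_split_check : Prop := ∀ (sentences : List String), Dom_text_split_check sentences → Spec_text_split_check sentences (text_split_check sentences)

-- ===== LEMMAS AND PROOFS =====

theorem pvRfind_lt_length (cs : List Char) (c : Char) : pvRfind cs c < (cs.length : Int) := by
  unfold pvRfind
  cases h : cs.reverse.findIdx? (fun ch => ch = c) with
  | none => simp; omega
  | some j =>
    have hj := List.findIdx?_eq_some_iff_findIdx_eq.mp h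
    simp at hj ⊢
    omega

theorem pvRfind_snoc (cs : List Char) (d c : Char) :
    pvRfind (cs ++ [d]) c = if d = c then (cs.length : Int) else pvRfind cs c := by
  unfold pvRfind
  rw [List.reverse_append]
  by_cases hd : d = c
  · simp [List.findIdx?_cons, hd]
  · simp only [List.reverse_singleton, List.singleton_append, List.findIdx?_cons,
      decide_eq_true_eq, hd, if_false]
    cases h : cs.reverse.findIdx? (fun ch => ch = c) with
    | none => simp
    | some j =>
      have hj := List.findIdx?_eq_some_iff_findIdx_eq.mp h
      simp at hj ⊢
      omega

theorem pvLastParen_snoc (cs : List Char) (d : Char) :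
    pvLastParen (cs ++ [d]) =
      if d = '(' ∨ d = ')' then some (decide (d = '(')) else pvLastParen cs := by
  unfold pvLastParen
  rw [List.reverse_append]
  by_cases h1 : d = '('
  · simp [h1]
  · by_cases h2 : d = ')'
    · simp [h2]
    · simp [h1, h2]

-- A's rfind comparison on a string equals "the last parenthesis is '('"
theorem key_lemma (cs : List Char) :
    (pvRfind cs '(' > pvRfind cs ')') ↔ pvLastParen cs = some true := by
  induction cs using List.reverseRecOn with
  | nil => simp [pvRfind, pvLastParen]
  | append_singleton cs d ih =>
    rw [pvRfind_snoc, pvRfind_snoc, pvLastParen_snoc]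
    by_cases h1 : d = '('
    · have hlt := pvRfind_lt_length cs ')'
      simp [h1]
      omega
    · by_cases h2 : d = ')'
      · have hlt := pvRfind_lt_length cs '('
        simp [h2]
        omega
      · simp [h1, h2, ih]

theorem pvLastParen_append (xs ys : List Char) :
    pvLastParen (xs ++ ys) =
      match pvLastParen ys with
      | some b => some b
      | none => pvLastParen xs := by
  unfold pvLastParen
  rw [List.reverse_append, List.find?_append]
  cases h : ys.reverse.find? (fun ch => ch == '(' || ch == ')') <;> simp [Option.or]

theorem loop_lemma (rest : List String) : ∀ (n k : Int) (done : List String) (cur : String)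
    (op : Bool), 1 ≤ k → k + (rest.length : Int) ≤ n →
    op = (pvLastParen cur.toList).getD false →
    (PySem.List.enumerate rest k).foldl (pvStepA n) (done ++ [cur]) =
      (let st := rest.foldl pvStepB (done, cur, op); st.1 ++ [st.2.1]) := by
  induction rest with
  | nil => intro n k done cur op _ _ _; simp [PySem.List.enumerate_nil]
  | cons s rest ih =>
    intro n k done cur op hk hn hop
    rw [PySem.List.enumerate_cons]
    simp only [List.foldl_cons, List.length_cons] at *
    have hstepA : pvStepA n (done ++ [cur]) (k, s) =
        if pvRfind cur.toList '(' > pvRfind cur.toList ')' then done ++ [cur ++ s]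
        else (done ++ [cur]) ++ [s] := by
      unfold pvStepA
      have hk0 : ¬ (k = 0) := by omega
      have hkn : ¬ (k = n) := by omega
      simp only [hk0, hkn, if_false, List.getLast?_concat, List.dropLast_concat]
    by_cases hpar : pvRfind cur.toList '(' > pvRfind cur.toList ')'
    · -- open parenthesis pending: extend cur
      have hsome : pvLastParen cur.toList = some true := (key_lemma cur.toList).mp hpar
      have hopT : op = true := by rw [hop, hsome]; rfl
      rw [hstepA, if_pos hpar]
      cases hls : pvLastParen s.toList with
      | some b =>
        have hB : pvStepB (done, cur, op) s = (done, cur ++ s, b) := by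
          simp [pvStepB, hopT, hls]
        have hinv : b = (pvLastParen (cur ++ s).toList).getD false := by
          rw [String.toList_append, pvLastParen_append, hls]
          rfl
        rw [hB, ih n (k + 1) done (cur ++ s) b (by omega) (by omega) hinv]
      | none =>
        have hB : pvStepB (done, cur, op) s = (done, cur ++ s, op) := by
          simp [pvStepB, hopT, hls]
        have hinv : op = (pvLastParen (cur ++ s).toList).getD false := by
          rw [String.toList_append, pvLastParen_append, hls]
          exact hop
        rw [hB, ih n (k + 1) done (cur ++ s) op (by omega) (by omega) hinv]
    · -- no pending '(': start a new fragment
      have hnone : pvLastParen cur.toList ≠ some true := fun h => hpar ((key_lemma cur.toList).mpr h)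
      have hopF : op = false := by
        rw [hop]; cases h : pvLastParen cur.toList with
        | none => rfl
        | some b => cases b with
          | false => rfl
          | true => exact absurd h hnone
      rw [hstepA, if_neg hpar]
      cases hls : pvLastParen s.toList with
      | some b =>
        have hB : pvStepB (done, cur, op) s = (done ++ [cur], s, b) := by
          simp [pvStepB, hopF, hls]
        rw [hB, ih n (k + 1) (done ++ [cur]) s b (by omega) (by omega) (by rw [hls]; rfl)]
      | none =>
        have hB : pvStepB (done, cur, op) s = (done ++ [cur], s, op) := by
          simp [pvStepB, hopF, hls]
        rw [hB, ih n (k + 1) (done ++ [cur]) s op (by omega) (by omega) (by rw [hls, hopF]; rfl)]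

-- ===== VERDICT (by name: the statement is the Claim_ definition above) =====
theorem text_split_check_spec : Claim_equal_text_split_check := by
  intro sentences _
  unfold Spec_text_split_check
  cases sentences with
  | nil => rfl
  | cons s0 rest =>
    show (PySem.List.enumerate (s0 :: rest)).foldl (pvStepA _) [] = _
    rw [PySem.List.enumerate_cons]
    simp only [List.foldl_cons]
    have h0 : pvStepA ((s0 :: rest).length : Int) [] (0, s0) = [] ++ [s0] := by
      simp [pvStepA]
    rw [h0, show (0:Int)+1 = 1 from rfl, loop_lemma rest ((s0 :: rest).length : Int) 1 [] s0
      ((pvLastParen s0.toList).getD false) (by omega) (by simp; omega) rfl]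
    rfl
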